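-- pv_equiv track=rewrite | github.com/pkitslaar/AdventOfCode | 2019/day 22/day_22.py | pow_compose
-- ===== SOURCE A (Python) =====
-- def compose(ab, cd, num_cards):
--     a,b,c,d = ab['a'], ab['b'], cd['a'], cd['b']
--     return {
--         'a': (a*c) % num_cards,
--         'b': (b*c+d) % num_cards
--     }
--
-- def pow_compose(f, k, N):
--     g = dict(a=1, b=0)
--     while k > 0:
--         if k % 2 != 0:
--             g = compose(g, f, N)
--         k = k//2
--         f = compose(f, f, N)
--     return g
-- ===== SOURCE B (Python) =====
-- def compose(ab, cd, num_cards):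
--     a,b,c,d = ab['a'], ab['b'], cd['a'], cd['b']
--     return {
--         'a': (a*c) % num_cards,
--         'b': (b*c+d) % num_cards
--     }
--
-- def pow_compose(f, k, N):
--     if k <= 0:
--         return dict(a=1, b=0)
--     half = pow_compose(compose(f, f, N), k // 2, N)
--     return compose(half, f, N) if k % 2 != 0 else half
-- ===== Notes on version B (the rewrite author's own statement) =====
-- stated objective: alternative
-- what changed: The bottom-up while-loop over the bits of k (accumulator g updated per bit, f repeatedly squared in place) is replaced by a top-down divide-and-conquer recursion: recurse on (f squared, k//2) and compose the half-result with f once iff k is odd; the compose helper is unchanged.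
import Mathlib
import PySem

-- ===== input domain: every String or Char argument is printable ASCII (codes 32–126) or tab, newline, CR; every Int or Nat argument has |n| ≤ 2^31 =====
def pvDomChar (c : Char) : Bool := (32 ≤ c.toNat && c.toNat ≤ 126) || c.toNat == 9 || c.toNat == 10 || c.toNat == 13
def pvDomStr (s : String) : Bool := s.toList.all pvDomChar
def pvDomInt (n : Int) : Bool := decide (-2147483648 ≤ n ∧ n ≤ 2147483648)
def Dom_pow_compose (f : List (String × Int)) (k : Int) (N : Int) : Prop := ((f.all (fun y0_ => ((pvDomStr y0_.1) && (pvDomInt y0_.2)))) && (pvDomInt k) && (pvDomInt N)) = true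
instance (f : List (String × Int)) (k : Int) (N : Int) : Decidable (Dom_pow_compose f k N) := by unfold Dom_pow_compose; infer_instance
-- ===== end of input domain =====

-- B re-implements pow_compose as a top-down divide-and-conquer recursion on the exponent
-- instead of A's bottom-up bit loop; same compose helper, same results (return value only).

-- ===== PORT A =====
-- shared helper: Python `compose` (used verbatim by both A and B).
-- Python indexes ab['a'] etc. (KeyError if absent): ported with getD _ _ 0; the missing-key
-- inputs (and N = 0, a ZeroDivisionError in %) are excluded by Pre_pow_compose.
def composeP (ab cd : List (String × Int)) (num_cards : Int) : List (String × Int) :=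
  let a := PySem.Dict.getD (PySem.Dict.mk ab) "a" 0
  let b := PySem.Dict.getD (PySem.Dict.mk ab) "b" 0
  let c := PySem.Dict.getD (PySem.Dict.mk cd) "a" 0
  let d := PySem.Dict.getD (PySem.Dict.mk cd) "b" 0
  [("a", PySem.Int.mod (a * c) num_cards), ("b", PySem.Int.mod (b * c + d) num_cards)]

-- A's while-loop: state (g, f, k), one iteration per step.
def powLoop (g f : List (String × Int)) (k : Int) (N : Int) : List (String × Int) :=
  if _h : 0 < k then
    let g' := if PySem.Int.mod k 2 ≠ 0 then composeP g f N else g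
    powLoop g' (composeP f f N) (PySem.Int.floordiv k 2) N
  else g
termination_by k.toNat
decreasing_by
  rw [PySem.Int.floordiv_eq_ediv_of_pos (by omega : (0:Int) < 2)]
  omega

def pow_compose (f : List (String × Int)) (k : Int) (N : Int) : List (String × Int) :=
  powLoop [("a", 1), ("b", 0)] f k N

-- ===== PORT B =====
def pow_compose_alt (f : List (String × Int)) (k : Int) (N : Int) : List (String × Int) :=
  if _h : k ≤ 0 then [("a", 1), ("b", 0)]
  else
    let half := pow_compose_alt (composeP f f N) (PySem.Int.floordiv k 2) N
    if PySem.Int.mod k 2 ≠ 0 then composeP half f N else half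
termination_by k.toNat
decreasing_by
  rw [PySem.Int.floordiv_eq_ediv_of_pos (by omega : (0:Int) < 2)]
  omega

-- ===== PRECONDITION & SPEC =====
-- Pre_ excludes exactly the inputs where Python A raises: when k > 0 the loop body runs, so
-- f must contain keys "a" and "b" (else KeyError) and N must be nonzero (else ZeroDivisionError).
def Pre_pow_compose (f : List (String × Int)) (k : Int) (N : Int) : Prop :=
  k ≤ 0 ∨ (N ≠ 0 ∧ PySem.Dict.contains (PySem.Dict.mk f) "a" = true ∧ PySem.Dict.contains (PySem.Dict.mk f) "b" = true)
instance (f : List (String × Int)) (k : Int) (N : Int) : Decidable (Pre_pow_compose f k N) := by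
  unfold Pre_pow_compose; infer_instance
def pvWitness_pow_compose : (List (String × Int)) × Int × Int := ([("a", 3), ("b", 5)], 6, 10)

def Spec_pow_compose (f : List (String × Int)) (k : Int) (N : Int) (out : List (String × Int)) : Prop := out = pow_compose_alt f k N
instance (f : List (String × Int)) (k : Int) (N : Int) (out : List (String × Int)) : Decidable (Spec_pow_compose f k N out) := by unfold Spec_pow_compose; infer_instance

-- ===== CLAIM (what is proved, stated in full; the proofs are below) =====
def Claim_equal_pow_compose : Prop := ∀ (f : List (String × Int)) (k : Int) (N : Int), Dom_pow_compose f k N → Pre_pow_compose f k N → Spec_pow_compose f k N (pow_compose f k N)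

-- ===== LEMMAS AND PROOFS =====

-- semantic view: an affine map as a pair (a, b), composition and the dict round-trips
def cpP (x y : Int × Int) (N : Int) : Int × Int :=
  (PySem.Int.mod (x.1 * y.1) N, PySem.Int.mod (x.2 * y.1 + y.2) N)

def gpP (d : List (String × Int)) : Int × Int :=
  (PySem.Dict.getD (PySem.Dict.mk d) "a" 0, PySem.Dict.getD (PySem.Dict.mk d) "b" 0)

def tdP (p : Int × Int) : List (String × Int) := [("a", p.1), ("b", p.2)]

-- iterated composition with itself, Nat exponent
def pwP (f : Int × Int) : Nat → Int → Int × Int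
  | 0, _ => (1, 0)
  | n + 1, N => cpP (pwP f n N) f N

theorem gpP_tdP (p : Int × Int) : gpP (tdP p) = p := by
  simp [gpP, tdP, PySem.Dict.getD, PySem.Dict.get?]

theorem composeP_eq (x y : List (String × Int)) (N : Int) :
    composeP x y N = tdP (cpP (gpP x) (gpP y) N) := rfl

theorem mod_sub_dvd (a N : Int) : N ∣ a - PySem.Int.mod a N := by
  refine ⟨PySem.Int.floordiv a N, ?_⟩
  have h := PySem.Int.floordiv_mul_add_mod a N
  linarith [h]

theorem mod_congr {a b N : Int} (h : N ∣ a - b) : PySem.Int.mod a N = PySem.Int.mod b N := by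
  have ha := PySem.Int.floordiv_mul_add_mod a N
  have hb := PySem.Int.floordiv_mul_add_mod b N
  have hdr : N ∣ PySem.Int.mod a N - PySem.Int.mod b N := by
    have h1 := mod_sub_dvd a N
    have h2 := mod_sub_dvd b N
    have : PySem.Int.mod a N - PySem.Int.mod b N
        = (a - b) - (a - PySem.Int.mod a N) + (b - PySem.Int.mod b N) := by ring
    rw [this]
    exact dvd_add (dvd_sub h h1) h2
  rcases lt_trichotomy N 0 with hN | hN | hN
  · have b1 := PySem.Int.mod_neg_bounds (a := a) (b := N) hN
    have b2 := PySem.Int.mod_neg_bounds (a := b) (b := N) hN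
    have hdr' : -N ∣ PySem.Int.mod a N - PySem.Int.mod b N := neg_dvd.mpr hdr
    have habs : |PySem.Int.mod a N - PySem.Int.mod b N| < -N := by
      rw [abs_lt]; omega
    have := Int.eq_zero_of_abs_lt_dvd hdr' habs
    omega
  · subst hN
    have : a - b = 0 := by simpa using h
    have : a = b := by omega
    rw [this]
  · have b1n := PySem.Int.mod_nonneg (a := a) (b := N) hN
    have b1l := PySem.Int.mod_lt (a := a) (b := N) hN
    have b2n := PySem.Int.mod_nonneg (a := b) (b := N) hN
    have b2l := PySem.Int.mod_lt (a := b) (b := N) hN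
    have habs : |PySem.Int.mod a N - PySem.Int.mod b N| < N := by
      rw [abs_lt]; omega
    have := Int.eq_zero_of_abs_lt_dvd hdr habs
    omega

theorem mod_idem (a N : Int) : PySem.Int.mod (PySem.Int.mod a N) N = PySem.Int.mod a N := by
  apply mod_congr
  have h := mod_sub_dvd a N
  have he : PySem.Int.mod a N - a = -(a - PySem.Int.mod a N) := by ring
  rw [he]
  exact dvd_neg.mpr h

-- lift mod out of products/sums inside another mod
theorem mod_mul_left (a c d N : Int) :
    PySem.Int.mod (PySem.Int.mod a N * c + d) N = PySem.Int.mod (a * c + d) N := by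
  apply mod_congr
  obtain ⟨t, ht⟩ := mod_sub_dvd a N
  exact ⟨-t * c, by rw [show PySem.Int.mod a N = a - N * t by omega]; ring⟩

theorem mod_mul_right (a c d N : Int) :
    PySem.Int.mod (c * PySem.Int.mod a N + d) N = PySem.Int.mod (c * a + d) N := by
  apply mod_congr
  obtain ⟨t, ht⟩ := mod_sub_dvd a N
  exact ⟨-c * t, by rw [show PySem.Int.mod a N = a - N * t by omega]; ring⟩

theorem mod_add_right (a c N : Int) :
    PySem.Int.mod (c + PySem.Int.mod a N) N = PySem.Int.mod (c + a) N := by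
  apply mod_congr
  obtain ⟨t, ht⟩ := mod_sub_dvd a N
  exact ⟨-t, by rw [show PySem.Int.mod a N = a - N * t by omega]; ring⟩

theorem cpP_assoc (x y z : Int × Int) (N : Int) :
    cpP (cpP x y N) z N = cpP x (cpP y z N) N := by
  obtain ⟨x1, x2⟩ := x; obtain ⟨y1, y2⟩ := y; obtain ⟨z1, z2⟩ := z
  unfold cpP
  simp only [Prod.mk.injEq]
  constructor
  · have h1 : PySem.Int.mod (PySem.Int.mod (x1 * y1) N * z1 + 0) N
        = PySem.Int.mod (x1 * y1 * z1 + 0) N := mod_mul_left _ _ _ _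
    have h2 : PySem.Int.mod (x1 * PySem.Int.mod (y1 * z1) N + 0) N
        = PySem.Int.mod (x1 * (y1 * z1) + 0) N := mod_mul_right _ _ _ _
    simp only [add_zero] at h1 h2
    rw [h1, h2, mul_assoc]
  · have h1 : PySem.Int.mod (PySem.Int.mod (x2 * y1 + y2) N * z1 + z2) N
        = PySem.Int.mod ((x2 * y1 + y2) * z1 + z2) N := mod_mul_left _ _ _ _
    have h2 : PySem.Int.mod (x2 * PySem.Int.mod (y1 * z1) N + PySem.Int.mod (y2 * z1 + z2) N) N
        = PySem.Int.mod (x2 * (y1 * z1) + PySem.Int.mod (y2 * z1 + z2) N) N := mod_mul_right _ _ _ _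
    have h3 : PySem.Int.mod (x2 * (y1 * z1) + PySem.Int.mod (y2 * z1 + z2) N) N
        = PySem.Int.mod (x2 * (y1 * z1) + (y2 * z1 + z2)) N := mod_add_right _ _ _
    rw [h1, h2, h3]
    ring_nf

-- composing with the mod-normalisation cp (1,0) f changes nothing
theorem cpP_nf_right (x f : Int × Int) (N : Int) :
    cpP x (cpP (1, 0) f N) N = cpP x f N := by
  obtain ⟨x1, x2⟩ := x; obtain ⟨f1, f2⟩ := f
  unfold cpP
  simp only [one_mul, zero_mul, zero_add, Prod.mk.injEq]
  constructor
  · have := mod_mul_right f1 x1 0 N; simpa using this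
  · have h1 : PySem.Int.mod (x2 * PySem.Int.mod f1 N + PySem.Int.mod f2 N) N
        = PySem.Int.mod (x2 * f1 + PySem.Int.mod f2 N) N := mod_mul_right _ _ _ _
    have h2 : PySem.Int.mod (x2 * f1 + PySem.Int.mod f2 N) N
        = PySem.Int.mod (x2 * f1 + f2) N := mod_add_right _ _ _
    rw [h1, h2]

theorem cpP_nf_left (f x : Int × Int) (N : Int) :
    cpP (cpP (1, 0) f N) x N = cpP f x N := by
  obtain ⟨x1, x2⟩ := x; obtain ⟨f1, f2⟩ := f
  unfold cpP
  simp only [one_mul, zero_mul, zero_add, Prod.mk.injEq]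
  constructor
  · have := mod_mul_left f1 x1 0 N; simpa using this
  · exact mod_mul_left _ _ _ _

theorem cpP_one_pw (f : Int × Int) (n : Nat) (N : Int) (hn : 1 ≤ n) :
    cpP (1, 0) (pwP f n N) N = pwP f n N := by
  obtain ⟨m, rfl⟩ : ∃ m, n = m + 1 := ⟨n - 1, by omega⟩
  show cpP (1, 0) (cpP (pwP f m N) f N) N = cpP (pwP f m N) f N
  unfold cpP
  simp [mod_idem]

theorem pwP_add (f : Int × Int) (N : Int) (m n : Nat) (hn : 1 ≤ n) :
    pwP f (m + n) N = cpP (pwP f m N) (pwP f n N) N := by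
  induction n with
  | zero => omega
  | succ n ih =>
    rcases Nat.eq_zero_or_pos n with h0 | hpos
    · subst h0
      show cpP (pwP f m N) f N = cpP (pwP f m N) (cpP (1,0) f N) N
      rw [cpP_nf_right]
    · have : m + (n + 1) = (m + n) + 1 := by omega
      rw [this]
      show cpP (pwP f (m + n) N) f N = cpP (pwP f m N) (cpP (pwP f n N) f N) N
      rw [ih hpos, cpP_assoc]

theorem pwP_sq (f : Int × Int) (N : Int) (n : Nat) (hn : 1 ≤ n) :
    pwP (cpP f f N) n N = pwP f (2 * n) N := by
  induction n with
  | zero => omega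
  | succ n ih =>
    rcases Nat.eq_zero_or_pos n with h0 | hpos
    · subst h0
      show cpP (1, 0) (cpP f f N) N = pwP f 2 N
      rw [← cpP_assoc]
      rfl
    · show cpP (pwP (cpP f f N) n N) (cpP f f N) N = pwP f (2 * (n + 1)) N
      rw [ih hpos, ← cpP_assoc]
      have h1 : (2 * (n + 1)) = (2 * n + 1) + 1 := by omega
      rw [h1]
      rfl

-- arithmetic facts about k // 2 and k % 2
theorem half_facts (k : Int) (hk : 0 < k) :
    0 ≤ PySem.Int.floordiv k 2 ∧
    k.toNat = 2 * (PySem.Int.floordiv k 2).toNat + (PySem.Int.mod k 2).toNat ∧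
    (PySem.Int.mod k 2 = 0 ∨ PySem.Int.mod k 2 = 1) ∧
    (2 ≤ k → 1 ≤ (PySem.Int.floordiv k 2).toNat) ∧
    (k = 1 → PySem.Int.floordiv k 2 = 0) := by
  have hd : PySem.Int.floordiv k 2 = k / 2 := PySem.Int.floordiv_eq_ediv_of_pos (by omega)
  have hm : PySem.Int.mod k 2 = k % 2 := PySem.Int.mod_eq_emod_of_pos (by omega)
  rw [hd, hm]
  omega

-- B's recursion computes pwP
theorem alt_eq_pwP (f : List (String × Int)) (k N : Int) (hk : 0 < k) :
    pow_compose_alt f k N = tdP (pwP (gpP f) k.toNat N) := by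
  generalize hn : k.toNat = n
  induction n using Nat.strong_induction_on generalizing f k with
  | _ n ih =>
    rw [pow_compose_alt]
    have hkle : ¬ k ≤ 0 := by omega
    simp only [hkle, dite_false]
    obtain ⟨hge0, hsum, hbit, h2, h1⟩ := half_facts k hk
    by_cases hone : k = 1
    · subst hone
      rw [h1 rfl]
      rw [pow_compose_alt]
      simp only [le_refl, dite_true]
      have : PySem.Int.mod 1 2 = 1 := by rcases hbit with h | h <;> omega
      rw [this]
      simp only [ne_eq, one_ne_zero, not_false_eq_true, if_true]
      rw [composeP_eq]
      have hg : gpP [("a", (1:Int)), ("b", (0:Int))] = (1, 0) := by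
        simp [gpP, PySem.Dict.getD, PySem.Dict.get?]
      have hn1 : n = 1 := by omega
      subst hn1
      rw [hg]
      rfl
    · have hk2 : 2 ≤ k := by omega
      have hrec := ih (PySem.Int.floordiv k 2).toNat (by omega)
        (composeP f f N) (PySem.Int.floordiv k 2) (by omega) rfl
      have hgc : gpP (composeP f f N) = cpP (gpP f) (gpP f) N := by
        rw [composeP_eq, gpP_tdP]
      rw [hrec, composeP_eq, gpP_tdP, hgc, pwP_sq _ _ _ (h2 hk2)]
      rcases hbit with hb | hb
      · rw [hb]
        simp only [ne_eq, not_true_eq_false, if_false]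
        have he : 2 * (PySem.Int.floordiv k 2).toNat = n := by omega
        rw [he]
      · rw [hb]
        simp only [ne_eq, one_ne_zero, not_false_eq_true, if_true]
        have he : n = 2 * (PySem.Int.floordiv k 2).toNat + 1 := by omega
        rw [he]
        rfl

-- A's loop computes g composed with pwP
theorem loop_eq_pwP (g f : List (String × Int)) (k N : Int) (hk : 0 < k) :
    powLoop g f k N = tdP (cpP (gpP g) (pwP (gpP f) k.toNat N) N) := by
  generalize hn : k.toNat = n
  induction n using Nat.strong_induction_on generalizing g f k with
  | _ n ih =>
    rw [powLoop]
    simp only [hk, dite_true]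
    obtain ⟨hge0, hsum, hbit, h2, h1⟩ := half_facts k hk
    by_cases hone : k = 1
    · subst hone
      rw [h1 rfl]
      have hm1 : PySem.Int.mod 1 2 = 1 := by rcases hbit with h | h <;> omega
      rw [hm1]
      simp only [ne_eq, one_ne_zero, not_false_eq_true, if_true]
      rw [powLoop]
      simp only [lt_irrefl, dite_false]
      rw [composeP_eq]
      simp only [← hn]
      show tdP (cpP (gpP g) (gpP f) N) = tdP (cpP (gpP g) (pwP (gpP f) 1 N) N)
      rw [show pwP (gpP f) 1 N = cpP (1,0) (gpP f) N from rfl, cpP_nf_right]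
    · have hk2 : 2 ≤ k := by omega
      rcases hbit with hb | hb
      · rw [hb]
        simp only [ne_eq, not_true_eq_false, if_false, not_false_eq_true]
        rw [ih (PySem.Int.floordiv k 2).toNat (by omega) g (composeP f f N)
          (PySem.Int.floordiv k 2) (by omega) rfl]
        rw [composeP_eq, gpP_tdP, pwP_sq _ _ _ (h2 hk2)]
        have : 2 * (PySem.Int.floordiv k 2).toNat = n := by omega
        rw [this]
      · rw [hb]
        simp only [ne_eq, one_ne_zero, not_false_eq_true, if_true]
        rw [ih (PySem.Int.floordiv k 2).toNat (by omega) (composeP g f N) (composeP f f N)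
          (PySem.Int.floordiv k 2) (by omega) rfl]
        rw [composeP_eq, composeP_eq, gpP_tdP, gpP_tdP, pwP_sq _ _ _ (h2 hk2)]
        rw [cpP_assoc]
        congr 2
        have hpos : 1 ≤ 2 * (PySem.Int.floordiv k 2).toNat := by omega
        calc cpP (gpP f) (pwP (gpP f) (2 * (PySem.Int.floordiv k 2).toNat) N) N
            = cpP (cpP (1,0) (gpP f) N) (pwP (gpP f) (2 * (PySem.Int.floordiv k 2).toNat) N) N := by
              rw [cpP_nf_left]
          _ = cpP (pwP (gpP f) 1 N) (pwP (gpP f) (2 * (PySem.Int.floordiv k 2).toNat) N) N := rfl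
          _ = pwP (gpP f) (1 + 2 * (PySem.Int.floordiv k 2).toNat) N := (pwP_add _ _ _ _ hpos).symm
          _ = pwP (gpP f) n N := by congr 1; omega

-- ===== VERDICT (by name: the statement is the Claim_ definition above) =====
theorem pow_compose_spec : Claim_equal_pow_compose := by
  intro f k N _hDom _hPre
  unfold Spec_pow_compose pow_compose
  by_cases hk : 0 < k
  · rw [loop_eq_pwP _ _ _ _ hk, alt_eq_pwP _ _ _ hk]
    have h1 : gpP [("a", (1:Int)), ("b", (0:Int))] = (1, 0) := by
      simp [gpP, PySem.Dict.getD, PySem.Dict.get?]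
    rw [h1, cpP_one_pw _ _ _ (by omega)]
  · rw [powLoop, pow_compose_alt]
    simp [hk, show k ≤ 0 by omega]
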